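-- pv_equiv track=rewrite | github.com/berkemBillur/ConvFinQA | src/utils/text_processing.py | extract_keywords_from_question
-- ===== SOURCE A (Python) =====
-- from typing import Dict, List, Tuple, Optional, Set, Any
--
-- def extract_keywords_from_question(question: str, target_keywords: List[str]) -> List[Tuple[str, int]]:
--     """Extract target keywords from question with their positions.
--
--     Args:
--         question: Question text to analyse.
--         target_keywords: List of keywords to search for.
--
--     Returns:
--         List of (keyword, position) tuples for found keywords.
--     """
--     question_lower = question.lower()
--     found_keywords = []
--
--     for keyword in target_keywords:
--         keyword_lower = keyword.lower()
--         start = 0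
--
--         while True:
--             pos = question_lower.find(keyword_lower, start)
--             if pos == -1:
--                 break
--
--             # Check if it's a whole word match
--             if (pos == 0 or not question_lower[pos-1].isalnum()) and \
--                (pos + len(keyword_lower) == len(question_lower) or not question_lower[pos + len(keyword_lower)].isalnum()):
--                 found_keywords.append((keyword, pos))
--
--             start = pos + 1
--
--     return found_keywords
-- ===== SOURCE B (Python) =====
-- def extract_keywords_from_question(question, target_keywords):
--     """Single pass over the question: at each word-boundary start position,
--     try every keyword and collect hits into per-keyword buckets, then
--     concatenate the buckets in keyword order."""
--     q = question.lower()
--     n = len(q)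
--     lows = [kw.lower() for kw in target_keywords]
--     buckets = [[] for _ in target_keywords]
--     for i in range(n + 1):
--         if i > 0 and q[i - 1].isalnum():
--             continue
--         for j, kl in enumerate(lows):
--             e = i + len(kl)
--             if q.startswith(kl, i) and e <= n and (e == n or not q[e].isalnum()):
--                 buckets[j].append((target_keywords[j], i))
--     return [hit for bucket in buckets for hit in bucket]
-- ===== Notes on version B (the rewrite author's own statement) =====
-- stated objective: faster
-- what changed: A runs a fresh str.find() scan of the question after every occurrence of every keyword; B makes one left-to-right pass over the question's start positions, skips non-word-boundary starts once for all keywords, tests each keyword at the remaining positions into per-keyword buckets, and concatenates the buckets in keyword order.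
import Mathlib
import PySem

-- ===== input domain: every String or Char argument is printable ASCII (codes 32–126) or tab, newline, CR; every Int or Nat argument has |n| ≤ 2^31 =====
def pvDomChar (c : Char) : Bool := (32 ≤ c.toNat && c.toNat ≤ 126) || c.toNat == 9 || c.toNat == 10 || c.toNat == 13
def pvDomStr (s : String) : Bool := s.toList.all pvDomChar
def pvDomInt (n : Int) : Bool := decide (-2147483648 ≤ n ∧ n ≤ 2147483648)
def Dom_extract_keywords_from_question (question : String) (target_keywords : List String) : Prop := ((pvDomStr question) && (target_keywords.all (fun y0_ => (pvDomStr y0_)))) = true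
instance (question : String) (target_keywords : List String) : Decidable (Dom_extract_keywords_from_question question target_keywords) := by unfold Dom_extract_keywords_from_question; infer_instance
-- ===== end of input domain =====

-- B replaces A's per-keyword repeated find() scans by one left-to-right pass over the
-- question's start positions, collecting hits into per-keyword buckets (objective: faster).

-- ===== PORT A =====
-- termination fact for A's `while True` loop, cited by `decreasing_by` below
theorem pvFindFromBounds (s sub : List Char) (k : Nat)
    (h : PySem.Chars.findFrom s sub (k : Int) none ≠ -1) :
    k ≤ s.length ∧ k ≤ (PySem.Chars.findFrom s sub (k : Int) none).toNat ∧
      (PySem.Chars.findFrom s sub (k : Int) none).toNat ≤ s.length := by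
  by_cases hk : k ≤ s.length
  · have hs := PySem.Chars.findFrom_natCast_spec s sub k hk h
    have hform := PySem.Chars.findFrom_natCast s sub k hk
    have hfind := PySem.Chars.find_le_length (List.drop k s) sub
    have hfindne : PySem.Chars.find (List.drop k s) sub ≠ -1 := by
      intro hc; rw [hform, if_pos hc] at h; exact h rfl
    refine ⟨hk, ?_, ?_⟩
    · omega
    · rw [hform, if_neg hfindne]
      simp only [List.length_drop] at hfind
      omega
  · exfalso; apply h
    unfold PySem.Chars.findFrom
    simp only []
    have hlt : ((s.length : Int)) < (k : Int) := by exact_mod_cast Nat.lt_of_not_le hk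
    split <;> first | rfl | (exfalso; omega)

-- A's inner `while True` loop for one keyword: repeated question_lower.find(keyword_lower, start)
-- (q[pos-1] / q[pos+len] are in range whenever Python reads them, ported as getD)
def pvALoop (ql : List Char) (kw : String) (kl : List Char) (start : Nat)
    (acc : List (String × Int)) : List (String × Int) :=
  let pos := PySem.Chars.findFrom ql kl (start : Int) none
  if h : pos = -1 then acc
  else
    let p := pos.toNat
    let acc' :=
      if ((decide (p = 0) || !(PySem.Chars.isalnum (ql.getD (p - 1) ' '))) &&
          (decide (p + kl.length = ql.length) || !(PySem.Chars.isalnum (ql.getD (p + kl.length) ' '))))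
      then acc ++ [(kw, (p : Int))] else acc
    pvALoop ql kw kl (p + 1) acc'
termination_by ql.length + 1 - start
decreasing_by
  have := pvFindFromBounds ql kl start h
  omega

def extract_keywords_from_question (question : String) (target_keywords : List String) :
    List (String × Int) :=
  let ql := PySem.Chars.lower question.toList
  target_keywords.foldl (fun acc kw => pvALoop ql kw (PySem.Chars.lower kw.toList) 0 acc) []

-- ===== PORT B =====
-- one step of B's inner `for j, kl in enumerate(lows)` loop, updating every bucket at position i
-- (q.startswith(kl, i) for 0 ≤ i ≤ len(q) is ported as prefix-of-drop)
def pvBStep (ql : List Char) (n : Nat) (i : Nat)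
    (bks : List (List (String × Int))) (pairs : List (String × List Char)) :
    List (List (String × Int)) :=
  bks.zipWith (fun bucket p =>
    if (PySem.Chars.startswith (ql.drop i) p.2 && decide (i + p.2.length ≤ n) &&
        (decide (i + p.2.length = n) || !(PySem.Chars.isalnum (ql.getD (i + p.2.length) ' '))))
    then bucket ++ [(p.1, (i : Int))] else bucket) pairs

def extract_keywords_from_question_alt (question : String) (target_keywords : List String) :
    List (String × Int) :=
  let ql := PySem.Chars.lower question.toList
  let n := ql.length
  let lows := target_keywords.map (fun kw => PySem.Chars.lower kw.toList)
  let buckets := (List.range (n + 1)).foldl (fun bks i =>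
      if decide (i > 0) && PySem.Chars.isalnum (ql.getD (i - 1) ' ') then bks
      else pvBStep ql n i bks (target_keywords.zip lows))
    (target_keywords.map (fun _ => []))
  buckets.flatten

-- ===== PRECONDITION & SPEC =====
def Spec_extract_keywords_from_question (question : String) (target_keywords : List String) (out : List (String × Int)) : Prop := out = extract_keywords_from_question_alt question target_keywords
instance (question : String) (target_keywords : List String) (out : List (String × Int)) : Decidable (Spec_extract_keywords_from_question question target_keywords out) := by unfold Spec_extract_keywords_from_question; infer_instance

-- ===== CLAIM (what is proved, stated in full; the proofs are below) =====
def Claim_equal_extract_keywords_from_question : Prop := ∀ (question : String) (target_keywords : List String), Dom_extract_keywords_from_question question target_keywords → Spec_extract_keywords_from_question question target_keywords (extract_keywords_from_question question target_keywords)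

-- ===== LEMMAS AND PROOFS =====

-- whole-word hit of keyword (lowercased kl) at position i of ql
def pvOk (ql kl : List Char) (i : Nat) : Bool :=
  kl.isPrefixOf (ql.drop i) &&
  (decide (i = 0) || !(PySem.Chars.isalnum (ql.getD (i - 1) ' '))) &&
  (decide (i + kl.length = ql.length) || !(PySem.Chars.isalnum (ql.getD (i + kl.length) ' ')))

def pvHits (ql : List Char) (kw : String) (kl : List Char) (m : Nat) : List (String × Int) :=
  ((List.range m).filter (fun i => pvOk ql kl i)).map (fun i : Nat => ((kw, (i : Int)) : String × Int))

theorem pvOk_false_of_not_prefix (ql kl : List Char) (i : Nat)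
    (h : ¬ kl <+: ql.drop i) : pvOk ql kl i = false := by
  cases hpre : kl.isPrefixOf (ql.drop i) with
  | false => simp [pvOk, hpre]
  | true => exact absurd (List.isPrefixOf_iff_prefix.mp hpre) h

theorem pvOk_false_of_no_prefix (ql kl : List Char) (s i : Nat) (hsi : s ≤ i)
    (hni : ¬ kl <:+: ql.drop s) : pvOk ql kl i = false := by
  apply pvOk_false_of_not_prefix
  intro hp
  apply hni
  have hd : ql.drop i = (ql.drop s).drop (i - s) := by rw [List.drop_drop]; congr 1; omega
  rw [hd] at hp
  exact hp.isInfix.trans (List.drop_suffix _ _).isInfix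

theorem pvALoop_eq (ql : List Char) (kw : String) (kl : List Char) (start : Nat)
    (acc : List (String × Int)) :
    pvALoop ql kw kl start acc =
      acc ++ ((List.range' start (ql.length + 1 - start)).filter (fun i => pvOk ql kl i)).map
        (fun i : Nat => ((kw, (i : Int)) : String × Int)) := by
  fun_induction pvALoop with
  | case1 start acc pos h =>
    by_cases hs : start ≤ ql.length
    · have hni : ¬ kl <:+: ql.drop start :=
        (PySem.Chars.findFrom_natCast_eq_neg_one_iff ql kl start hs).mp h
      have hnil : (List.range' start (ql.length + 1 - start)).filter (fun i => pvOk ql kl i) = [] := by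
        rw [List.filter_eq_nil_iff]
        intro i hi
        have := (List.mem_range'_1.mp hi).1
        simp [pvOk_false_of_no_prefix ql kl start i this hni]
      rw [hnil]; simp
    · have : ql.length + 1 - start = 0 := by omega
      rw [this]; simp
  | case2 start acc pos h p acc' ih =>
    have hb := pvFindFromBounds ql kl start h
    have hspec := PySem.Chars.findFrom_natCast_spec ql kl start hb.1 h
    have hpre : kl.isPrefixOf (ql.drop p) = true :=
      List.isPrefixOf_iff_prefix.mpr hspec.2.1
    have hsplit : List.range' start (ql.length + 1 - start) =
        List.range' start (p - start) ++ p :: List.range' (p + 1) (ql.length - p) := by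
      have h1 : List.range' start (p - start) ++ List.range' (start + 1 * (p - start)) (ql.length + 1 - p) =
          List.range' start ((p - start) + (ql.length + 1 - p)) := List.range'_append
      have h2 : start + 1 * (p - start) = p := by omega
      have h3 : (p - start) + (ql.length + 1 - p) = ql.length + 1 - start := by omega
      have h4 : ql.length + 1 - p = (ql.length - p) + 1 := by omega
      rw [h2, h3, h4, List.range'_succ] at h1
      exact h1.symm
    have hnil : (List.range' start (p - start)).filter (fun i => pvOk ql kl i) = [] := by
      rw [List.filter_eq_nil_iff]
      intro i hi
      have hmem := List.mem_range'_1.mp hi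
      have hnp : ¬ kl <+: ql.drop i := hspec.2.2 i hmem.1 (by omega)
      simp [pvOk_false_of_not_prefix ql kl i hnp]
    have hokp : pvOk ql kl p =
        ((decide (p = 0) || !PySem.Chars.isalnum (ql.getD (p - 1) ' ')) &&
         (decide (p + kl.length = ql.length) || !PySem.Chars.isalnum (ql.getD (p + kl.length) ' '))) := by
      unfold pvOk
      rw [hpre, Bool.true_and]
    have h5 : ql.length + 1 - (p + 1) = ql.length - p := by omega
    rw [ih, hsplit, List.filter_append, hnil, List.filter_cons, h5]
    by_cases hcond : ((decide (p = 0) || !PySem.Chars.isalnum (ql.getD (p - 1) ' ')) &&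
        (decide (p + kl.length = ql.length) || !PySem.Chars.isalnum (ql.getD (p + kl.length) ' '))) = true
    · simp only [acc', hokp, hcond, if_pos, List.nil_append, List.map_cons, dif_pos hcond]
      simp
    · simp only [acc', hokp]
      rw [dif_neg hcond, if_neg hcond]
      simp

theorem pvHits_succ (ql : List Char) (kw : String) (kl : List Char) (m : Nat) :
    pvHits ql kw kl (m + 1) =
      pvHits ql kw kl m ++ (if pvOk ql kl m then [((kw, (m : Int)) : String × Int)] else []) := by
  unfold pvHits
  rw [List.range_succ, List.filter_append, List.map_append, List.filter_cons]
  cases hok : pvOk ql kl m <;> simp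

theorem pvStep_cond (ql kl : List Char) (m : Nat) (hm : m ≤ ql.length)
    (hg : (decide (m > 0) && PySem.Chars.isalnum (ql.getD (m - 1) ' ')) = false) :
    (PySem.Chars.startswith (ql.drop m) kl && decide (m + kl.length ≤ ql.length) &&
     (decide (m + kl.length = ql.length) || !PySem.Chars.isalnum (ql.getD (m + kl.length) ' '))) =
    pvOk ql kl m := by
  have hsw : PySem.Chars.startswith (ql.drop m) kl = kl.isPrefixOf (ql.drop m) := rfl
  unfold pvOk
  rw [hsw]
  cases hpre : kl.isPrefixOf (ql.drop m) with
  | false => simp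
  | true =>
    have hlen : kl.length ≤ ql.length - m := by
      have := (List.isPrefixOf_iff_prefix.mp hpre).length_le
      simpa using this
    have h1 : decide (m + kl.length ≤ ql.length) = true := by
      simp only [decide_eq_true_eq]; omega
    have h2 : (decide (m = 0) || !PySem.Chars.isalnum (ql.getD (m - 1) ' ')) = true := by
      rcases Nat.eq_zero_or_pos m with h0 | h0
      · simp [h0]
      · have hg' : decide (m > 0) = true := by simp [h0]
        rw [hg', Bool.true_and] at hg
        rw [hg]
        simp
    rw [h1, h2]

theorem pvOk_false_of_guard (ql kl : List Char) (m : Nat)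
    (hg : (decide (m > 0) && PySem.Chars.isalnum (ql.getD (m - 1) ' ')) = true) :
    pvOk ql kl m = false := by
  unfold pvOk
  have hm : 0 < m := by
    rcases Bool.and_eq_true_iff.mp hg with ⟨h1, _⟩
    simpa using h1
  have ha : PySem.Chars.isalnum (ql.getD (m - 1) ' ') = true :=
    (Bool.and_eq_true_iff.mp hg).2
  have : (decide (m = 0) || !PySem.Chars.isalnum (ql.getD (m - 1) ' ')) = false := by
    have h0 : decide (m = 0) = false := by simp; omega
    rw [h0, ha]
    rfl
  rw [this]
  simp

theorem pvB_buckets (ql : List Char) (tks : List String) (m : Nat) (hm : m ≤ ql.length + 1) :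
    (List.range m).foldl (fun bks i =>
        if decide (i > 0) && PySem.Chars.isalnum (ql.getD (i - 1) ' ') then bks
        else pvBStep ql ql.length i bks (tks.zip (tks.map (fun kw => PySem.Chars.lower kw.toList))))
      (tks.map (fun _ => [])) =
    tks.map (fun kw => pvHits ql kw (PySem.Chars.lower kw.toList) m) := by
  induction m with
  | zero => simp [pvHits]
  | succ m ih =>
    have hm' : m ≤ ql.length + 1 := by omega
    rw [List.range_succ, List.foldl_append, ih hm']
    simp only [List.foldl_cons, List.foldl_nil]
    cases hg : (decide (m > 0) && PySem.Chars.isalnum (ql.getD (m - 1) ' ')) with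
    | true =>
      rw [if_pos rfl]
      apply List.map_congr_left
      intro kw _
      rw [pvHits_succ, pvOk_false_of_guard ql _ m hg]
      simp
    | false =>
      rw [if_neg (by simp)]
      unfold pvBStep
      have hzip : tks.zip (tks.map (fun kw => PySem.Chars.lower kw.toList)) =
          tks.map (fun kw => (kw, PySem.Chars.lower kw.toList)) := by
        have := @List.zip_map' String String (List Char) id (fun kw => PySem.Chars.lower kw.toList) tks
        simpa using this
      rw [hzip, List.zipWith_map_left, List.zipWith_map_right, List.zipWith_self]
      apply List.map_congr_left
      intro kw _
      have hc : (PySem.Chars.startswith (List.drop m ql) (kw, PySem.Chars.lower kw.toList).2 &&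
          decide (m + (kw, PySem.Chars.lower kw.toList).2.length ≤ ql.length) &&
          (decide (m + (kw, PySem.Chars.lower kw.toList).2.length = ql.length) ||
            !PySem.Chars.isalnum (ql.getD (m + (kw, PySem.Chars.lower kw.toList).2.length) ' '))) =
          pvOk ql (PySem.Chars.lower kw.toList) m :=
        pvStep_cond ql (PySem.Chars.lower kw.toList) m (by omega) hg
      rw [pvHits_succ, hc]
      cases hok : pvOk ql (PySem.Chars.lower kw.toList) m <;> simp

-- ===== VERDICT (by name: the statement is the Claim_ definition above) =====
theorem extract_keywords_from_question_spec : Claim_equal_extract_keywords_from_question := by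
  intro question target_keywords _
  unfold Spec_extract_keywords_from_question
  simp only [extract_keywords_from_question, extract_keywords_from_question_alt]
  have hfun : (fun (acc : List (String × Int)) (kw : String) =>
      pvALoop (PySem.Chars.lower question.toList) kw (PySem.Chars.lower kw.toList) 0 acc) =
      (fun (acc : List (String × Int)) (kw : String) =>
        acc ++ pvHits (PySem.Chars.lower question.toList) kw (PySem.Chars.lower kw.toList)
          ((PySem.Chars.lower question.toList).length + 1)) := by
    funext acc kw
    rw [pvALoop_eq]
    simp [pvHits, List.range_eq_range']
  rw [hfun, PySem.List.foldl_append_eq_flatMap,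
    pvB_buckets (PySem.Chars.lower question.toList) target_keywords
      ((PySem.Chars.lower question.toList).length + 1) (le_refl _),
    List.flatMap_def]
  simp
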